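-- pv_equiv track=rewrite | github.com/NicolasAbroad/Random | game_of_life.py | count_living_neighbours
-- ===== SOURCE A (Python) =====
-- def count_living_neighbours(map, x, y):
--     """Count living neighbours
--
--     Arguments:
--         map [Array] -- Cell map,
--         x [int] -- x position,
--         y [int] -- y position
--
--     Returns:
--         [int] -- Living neighbours count
--     """
--     count = 0
--     length = len(map)
--     width = len(map[0])
--
--     for i in range(-1, 2):
--         for j in range(-1, 2):
--             neighbour_x = x + i
--             neighbour_y = y + j
--
--             # Skip middle
--             if i is 0 and j is 0:
--                 continue
--
--             # Skip edge cases
--             if neighbour_x < 0 or neighbour_y < 0: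
--                 continue
--             if neighbour_x >= width or neighbour_y >= length:
--                 continue
--
--             count += 1
--
--     return count
-- ===== SOURCE B (Python) =====
-- def count_living_neighbours(map, x, y):
--     length = len(map)
--     width = len(map[0])
--     cx = sum(1 for d in (-1, 0, 1) if 0 <= x + d < width)
--     cy = sum(1 for d in (-1, 0, 1) if 0 <= y + d < length)
--     centre = 1 if (0 <= x < width and 0 <= y < length) else 0
--     return cx * cy - centre
-- ===== Notes on version B (the rewrite author's own statement) =====
-- stated objective: simpler
-- what changed: Replaces the 3x3 nested loop with a closed form: counts of in-bounds x-offsets and y-offsets are multiplied and the centre cell subtracted when it is itself in bounds.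
import Mathlib
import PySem

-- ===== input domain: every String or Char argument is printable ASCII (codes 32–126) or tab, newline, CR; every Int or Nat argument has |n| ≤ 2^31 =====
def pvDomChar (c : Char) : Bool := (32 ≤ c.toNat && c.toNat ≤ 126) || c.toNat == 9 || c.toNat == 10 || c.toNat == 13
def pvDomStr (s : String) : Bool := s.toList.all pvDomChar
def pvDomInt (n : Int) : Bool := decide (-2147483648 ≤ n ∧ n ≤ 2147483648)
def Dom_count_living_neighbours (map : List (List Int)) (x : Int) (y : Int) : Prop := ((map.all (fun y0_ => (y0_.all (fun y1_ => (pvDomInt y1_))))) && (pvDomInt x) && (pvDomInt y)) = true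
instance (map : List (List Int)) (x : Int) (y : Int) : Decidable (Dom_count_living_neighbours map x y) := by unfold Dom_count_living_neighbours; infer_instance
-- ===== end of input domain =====

-- B replaces A's 3x3 double loop by a closed form: the product of the per-axis
-- in-bounds offset counts, minus the centre cell when it is itself in bounds
-- (objective: simpler).

-- ===== PORT A =====
def count_living_neighbours (map : List (List Int)) (x : Int) (y : Int) : Int :=
  let count : Int := 0
  let length : Int := (map.length : Int)
  let width : Int := (((PySem.List.pyGet? map 0).getD []).length : Int)
  (PySem.List.pyRange (-1) 2 1).foldl (fun count i =>
    (PySem.List.pyRange (-1) 2 1).foldl (fun count j =>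
      if i = 0 ∧ j = 0 then count
      else if x + i < 0 ∨ y + j < 0 then count
      else if x + i ≥ width ∨ y + j ≥ length then count
      else count + 1) count) count

-- ===== PORT B =====
def count_living_neighbours_alt (map : List (List Int)) (x : Int) (y : Int) : Int :=
  let length : Int := (map.length : Int)
  let width : Int := (((PySem.List.pyGet? map 0).getD []).length : Int)
  let cx : Int := (([-1, 0, 1] : List Int).countP (fun d => decide (0 ≤ x + d ∧ x + d < width)) : Int)
  let cy : Int := (([-1, 0, 1] : List Int).countP (fun d => decide (0 ≤ y + d ∧ y + d < length)) : Int)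
  let centre : Int := if 0 ≤ x ∧ x < width ∧ 0 ≤ y ∧ y < length then 1 else 0
  cx * cy - centre

-- ===== PRECONDITION & SPEC =====
-- A raises IndexError at map[0] on the empty map; Pre_ excludes exactly that input.
def Pre_count_living_neighbours (map : List (List Int)) (x : Int) (y : Int) : Prop := map ≠ []
instance (map : List (List Int)) (x : Int) (y : Int) : Decidable (Pre_count_living_neighbours map x y) := by unfold Pre_count_living_neighbours; infer_instance
def pvWitness_count_living_neighbours : List (List Int) × Int × Int := ([[1, 0], [0, 1]], 1, 0)

def Spec_count_living_neighbours (map : List (List Int)) (x : Int) (y : Int) (out : Int) : Prop := out = count_living_neighbours_alt map x y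
instance (map : List (List Int)) (x : Int) (y : Int) (out : Int) : Decidable (Spec_count_living_neighbours map x y out) := by unfold Spec_count_living_neighbours; infer_instance

-- ===== CLAIM (what is proved, stated in full; the proofs are below) =====
def Claim_equal_count_living_neighbours : Prop := ∀ (map : List (List Int)) (x : Int) (y : Int), Dom_count_living_neighbours map x y → Pre_count_living_neighbours map x y → Spec_count_living_neighbours map x y (count_living_neighbours map x y)

-- ===== LEMMAS AND PROOFS =====
theorem pyRange_m1_2 : PySem.List.pyRange (-1) 2 1 = [-1, 0, 1] := by decide

-- one step of A's inner else-if chain, written additively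
theorem step_add (c : Int) (P Q R : Prop) [Decidable P] [Decidable Q] [Decidable R] :
    (if P then c else if Q then c else if R then c else c + 1)
      = c + (if ¬P ∧ ¬Q ∧ ¬R then 1 else 0) := by
  split_ifs <;> first | omega | tauto

-- a non-centre cell's indicator splits into the product of per-axis indicators
theorem side_mulA (x y W L i j : Int) (A : Prop) [Decidable A] (h : ¬A) :
    (if ¬A ∧ ¬(x + i < 0 ∨ y + j < 0) ∧ ¬(x + i ≥ W ∨ y + j ≥ L) then (1:Int) else 0)
      = (if 0 ≤ x + i ∧ x + i < W then 1 else 0) * (if 0 ≤ y + j ∧ y + j < L then 1 else 0) := by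
  have e : (¬A ∧ ¬(x + i < 0 ∨ y + j < 0) ∧ ¬(x + i ≥ W ∨ y + j ≥ L))
      ↔ ((0 ≤ x + i ∧ x + i < W) ∧ (0 ≤ y + j ∧ y + j < L)) := by
    constructor
    · rintro ⟨-, hb, hc⟩; omega
    · rintro ⟨hb, hc⟩; exact ⟨h, by omega, by omega⟩
  rw [if_congr e rfl rfl]
  split_ifs <;> simp_all

-- the centre term contributes nothing (its skip condition holds)
theorem mid_zeroA (A P Q : Prop) [Decidable A] [Decidable P] [Decidable Q] (h : A) :
    (if ¬A ∧ P ∧ Q then (1:Int) else 0) = 0 := by simp [h]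

-- B's centre indicator as a product of per-axis indicators
theorem centre_mul (x y W L : Int) :
    (if 0 ≤ x ∧ x < W ∧ 0 ≤ y ∧ y < L then (1:Int) else 0)
      = (if 0 ≤ x + 0 ∧ x + 0 < W then 1 else 0) * (if 0 ≤ y + 0 ∧ y + 0 < L then 1 else 0) := by
  split_ifs <;> first | rfl | omega

-- the core identity: A's 3x3 fold equals B's product-minus-centre, for any W, L
theorem key (x y L W : Int) :
  (([-1,0,1]:List Int).foldl (fun count i => ([-1,0,1]:List Int).foldl (fun count j =>
      if i = 0 ∧ j = 0 then count
      else if x+i < 0 ∨ y+j < 0 then count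
      else if x+i ≥ W ∨ y+j ≥ L then count
      else count+1) count) (0:Int))
  = ((([-1,0,1]:List Int).countP (fun d => decide (0 ≤ x+d ∧ x+d < W)) : Int)
      * ((([-1,0,1]:List Int).countP (fun d => decide (0 ≤ y+d ∧ y+d < L)) : Int))
      - (if 0 ≤ x ∧ x < W ∧ 0 ≤ y ∧ y < L then 1 else 0)) := by
  simp only [List.foldl_cons, List.foldl_nil, step_add,
    List.countP_cons, List.countP_nil, decide_eq_true_eq, centre_mul]
  rw [side_mulA x y W L (-1) (-1) _ (by decide),
      side_mulA x y W L (-1) 0 _ (by decide),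
      side_mulA x y W L (-1) 1 _ (by decide),
      side_mulA x y W L 0 (-1) _ (by decide),
      mid_zeroA (True ∧ True) _ _ (by decide),
      side_mulA x y W L 0 1 _ (by decide),
      side_mulA x y W L 1 (-1) _ (by decide),
      side_mulA x y W L 1 0 _ (by decide),
      side_mulA x y W L 1 1 _ (by decide)]
  push_cast
  ring

-- ===== VERDICT (by name: the statement is the Claim_ definition above) =====
theorem count_living_neighbours_spec : Claim_equal_count_living_neighbours := by
  intro map x y _ _
  unfold Spec_count_living_neighbours count_living_neighbours count_living_neighbours_alt
  simp only [pyRange_m1_2]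
  exact key x y (map.length : Int) (((PySem.List.pyGet? map 0).getD []).length : Int)
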